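-- pv_equiv track=rewrite | github.com/gunnarbeutner/sbncng | src/sbnc/utils.py | parse_irc_message
-- ===== SOURCE A (Python) =====
-- def parse_irc_message(line):
--     """Parses an IRC message, returns a tuple containing the prefix (if
--     any, None otherwise), the command and a list containing the arguments"""
--
--     tokens = line.split(' ')
--
--     prefix = None
--     args = []
--
--     first = True
--     last = False
--     last_arg = None
--
--     for token in tokens:
--         if first and len(token) > 0 and token[0] == ':':
--             token = token[1:]
--             prefix = token
--             first = False
--
--             continue
--
--         first = False
--
--         if not last and len(token) > 0 and token[0] == ':':
--             token = token[1:]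
--             last = True
--
--         first = False
--
--         if not last:
--             args.append(token)
--             continue
--
--         if last_arg == None:
--             last_arg = token
--         else:
--             last_arg = "%s %s" % (last_arg, token)
--
--     if last_arg:
--         args.append(last_arg)
--
--     command = None
--
--     if len(args) > 0:
--         command = args[0]
--         args = args[1:]
--
--     return prefix, command, args
-- ===== SOURCE B (Python) =====
-- def parse_irc_message(line):
--     """Parse an IRC message into (prefix, command, args) by slicing the
--     token list at the first ':'-token instead of a flag-driven loop."""
--     tokens = line.split(' ')
--     prefix = None
--     if tokens and tokens[0].startswith(':'):
--         prefix = tokens[0][1:]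
--         tokens = tokens[1:]
--     i = next((k for k, t in enumerate(tokens) if t.startswith(':')), None)
--     if i is None:
--         args = tokens
--     else:
--         trailing = ' '.join(tokens[i:])[1:]
--         args = tokens[:i]
--         if trailing:
--             args.append(trailing)
--     command = None
--     if args:
--         command = args[0]
--         args = args[1:]
--     return prefix, command, args
-- ===== Notes on version B (the rewrite author's own statement) =====
-- stated objective: simpler
-- what changed: Replaced A's flag-driven accumulator loop (first/last flags, incremental '%s %s' trailing accumulation) with a find-and-slice decomposition: pop a ':'-prefixed first token as prefix, locate the first remaining ':'-token, slice args before it and build the trailing with one join.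
import Mathlib
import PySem

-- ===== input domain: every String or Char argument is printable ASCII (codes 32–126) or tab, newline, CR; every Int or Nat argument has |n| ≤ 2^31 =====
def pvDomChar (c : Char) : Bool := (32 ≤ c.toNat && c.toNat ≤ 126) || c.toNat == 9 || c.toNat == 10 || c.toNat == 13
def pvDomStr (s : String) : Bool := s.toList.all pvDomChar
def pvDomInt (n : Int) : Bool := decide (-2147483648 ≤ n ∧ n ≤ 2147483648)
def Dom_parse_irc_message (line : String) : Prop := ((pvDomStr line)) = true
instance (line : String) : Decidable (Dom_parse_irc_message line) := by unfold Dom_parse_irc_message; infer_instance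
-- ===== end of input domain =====

-- B replaces A's flag-driven accumulator loop by a find-and-slice decomposition (objective: simpler); return values proved equal on all inputs.

-- ===== PORT A =====
-- A's for-loop over the tokens; state: prefix, args, first, last, last_arg (strings as List Char).
def pimLoop : List (List Char) → Option (List Char) → List (List Char) → Bool → Bool → Option (List Char) →
    Option (List Char) × List (List Char) × Option (List Char)
  | [], pfx, args, _, _, lastArg => (pfx, args, lastArg)
  | t :: ts, pfx, args, first, lastb, lastArg =>
    if first && (decide (0 < t.length) && (t[0]? == some ':')) then
      -- token = token[1:]; prefix = token; first = False; continue
      pimLoop ts (some (t.drop 1)) args false lastb lastArg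
    else
      -- first = False; then 'if not last and len(token) > 0 and token[0] == ":"': strip colon, set last
      let pr : List Char × Bool :=
        if !lastb && (decide (0 < t.length) && (t[0]? == some ':')) then (t.drop 1, true) else (t, lastb)
      if pr.2 = false then
        pimLoop ts pfx (args ++ [pr.1]) false pr.2 lastArg
      else
        match lastArg with
        | none => pimLoop ts pfx args false pr.2 (some pr.1)
        | some s => pimLoop ts pfx args false pr.2 (some (s ++ ' ' :: pr.1))  -- "%s %s" % (last_arg, token)

def parse_irc_message (line : String) : Option String × Option String × List String :=
  let tokens := PySem.Chars.splitOn line.toList [' ']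
  let r := pimLoop tokens none [] true false none
  let args :=
    match r.2.2 with
    | some s => if s ≠ [] then r.2.1 ++ [s] else r.2.1   -- 'if last_arg:' (None and "" are falsy)
    | none => r.2.1
  match args with
  | [] => (r.1.map String.ofList, none, [])
  | c :: rest => (r.1.map String.ofList, some (String.ofList c), rest.map String.ofList)

-- ===== PORT B =====
-- index of the first token starting with ':'  (Source B's next(... enumerate ...))
def pimFindColon (tokens : List (List Char)) : Option Nat :=
  tokens.findIdx? (fun t => PySem.Chars.startswith t [':'])

def parse_irc_message_alt (line : String) : Option String × Option String × List String :=
  let tokens := PySem.Chars.splitOn line.toList [' ']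
  let pr : Option (List Char) × List (List Char) :=
    match tokens with
    | t :: ts => if PySem.Chars.startswith t [':'] then (some (t.drop 1), ts) else (none, t :: ts)
    | [] => (none, [])
  let args :=
    match pimFindColon pr.2 with
    | none => pr.2
    | some i =>
      let trailing := (PySem.Chars.join [' '] (pr.2.drop i)).drop 1
      pr.2.take i ++ (if trailing ≠ [] then [trailing] else [])
  match args with
  | [] => (pr.1.map String.ofList, none, [])
  | c :: cs => (pr.1.map String.ofList, some (String.ofList c), cs.map String.ofList)

-- ===== PRECONDITION & SPEC =====
def Spec_parse_irc_message (line : String) (out : Option String × Option String × List String) : Prop := out = parse_irc_message_alt line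
instance (line : String) (out : Option String × Option String × List String) : Decidable (Spec_parse_irc_message line out) := by unfold Spec_parse_irc_message; infer_instance

-- ===== CLAIM (what is proved, stated in full; the proofs are below) =====
def Claim_equal_parse_irc_message : Prop := ∀ (line : String), Dom_parse_irc_message line → Spec_parse_irc_message line (parse_irc_message line)

-- ===== LEMMAS AND PROOFS =====

-- A's inline test 'len(token) > 0 and token[0] == ":"' is B's startswith(':')
theorem pim_cond_eq (t : List Char) :
    (decide (0 < t.length) && (t[0]? == some ':')) = PySem.Chars.startswith t [':'] := by
  rw [Bool.eq_iff_iff]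
  simp only [Bool.and_eq_true, decide_eq_true_eq, beq_iff_eq, PySem.Chars.startswith_iff]
  cases t with
  | nil => simp
  | cons c r => simp [List.cons_prefix_cons, eq_comm]

-- ' '.join(s :: ts) written out
theorem pim_join_flat (ts : List (List Char)) (s : List Char) :
    PySem.Chars.join [' '] (s :: ts) = s ++ (ts.map (List.cons ' ')).flatten := by
  induction ts generalizing s with
  | nil => simp [PySem.Chars.join_singleton]
  | cons t ts ih => rw [PySem.Chars.join_cons_cons, ih t]; simp

-- once 'last' is set, the loop only extends last_arg with " %s" per token
theorem pimLoop_trail (ts : List (List Char)) (pfx : Option (List Char)) (args : List (List Char)) (s : List Char) :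
    pimLoop ts pfx args false true (some s) = (pfx, args, some (s ++ (ts.map (List.cons ' ')).flatten)) := by
  induction ts generalizing s with
  | nil => simp [pimLoop]
  | cons t ts ih => simp [pimLoop, ih, List.append_assoc]

-- the loop after the prefix token: args collects tokens before the first ':'-token, last_arg their join
theorem pimLoop_scan (ts : List (List Char)) (pfx : Option (List Char)) (args : List (List Char)) :
    pimLoop ts pfx args false false none =
      match ts.findIdx? (fun t => PySem.Chars.startswith t [':']) with
      | none => (pfx, args ++ ts, none)
      | some i => (pfx, args ++ ts.take i, some ((PySem.Chars.join [' '] (ts.drop i)).drop 1)) := by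
  induction ts generalizing args with
  | nil => simp [pimLoop]
  | cons t ts ih =>
    rw [pimLoop, List.findIdx?_cons]
    cases h : PySem.Chars.startswith t [':'] with
    | true =>
      obtain ⟨r, rfl⟩ : ∃ r, t = ':' :: r := by
        have h' := (PySem.Chars.startswith_iff t [':']).mp h
        exact ⟨t.tail, by cases t with
          | nil => simp at h'
          | cons c r => simpa using congrArg (List.cons · r) (List.cons_prefix_cons.mp h').1.symm⟩
      simp only [pim_cond_eq, h, Bool.not_false, Bool.true_and, Bool.false_eq_true, if_false, if_true]
      rw [if_neg (by simp), pimLoop_trail]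
      simp [pim_join_flat]
    | false =>
      simp only [pim_cond_eq, h, Bool.not_false, Bool.true_and, Bool.false_eq_true, if_false]
      rw [if_pos trivial, ih (args ++ [t])]
      cases hfi : ts.findIdx? (fun t => PySem.Chars.startswith t [':']) with
      | none => simp
      | some i => simp

-- ===== VERDICT (by name: the statement is the Claim_ definition above) =====
theorem parse_irc_message_spec : Claim_equal_parse_irc_message := by
  intro line _
  show parse_irc_message line = parse_irc_message_alt line
  simp only [parse_irc_message, parse_irc_message_alt, pimFindColon]
  cases htok : PySem.Chars.splitOn line.toList [' '] with
  | nil => rfl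
  | cons t ts =>
    rw [pimLoop]
    cases h : PySem.Chars.startswith t [':'] with
    | true =>
      simp only [pim_cond_eq, h, Bool.true_and, if_true]
      rw [pimLoop_scan]
      cases hfi : ts.findIdx? (fun t => PySem.Chars.startswith t [':']) with
      | none => simp
      | some i =>
        by_cases htr : (PySem.Chars.join [' '] (ts.drop i)).tail = [] <;>
          simp [List.drop_one, htr]
    | false =>
      simp only [pim_cond_eq, h, Bool.not_false, Bool.true_and, Bool.false_eq_true, if_false]
      rw [if_pos trivial, pimLoop_scan, List.findIdx?_cons]
      simp only [h, Bool.false_eq_true, if_false]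
      cases hfi : ts.findIdx? (fun t => PySem.Chars.startswith t [':']) with
      | none => simp
      | some i =>
        by_cases htr : (PySem.Chars.join [' '] (ts.drop i)).tail = [] <;>
          simp [List.drop_one, htr]
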